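-- pv_equiv track=rewrite | github.com/nailasuely/gamification | mod.py | smallest_column
-- ===== SOURCE A (Python) =====
-- def smallest_column(matriz, numerocol):
--     listamenores = []
--     lista_verificar = []
--     for linha in range(len(matriz)):
--         listamenores.append(matriz[linha][numerocol])
--     for i in listamenores:
--         if i != 0:
--             lista_verificar.append(i)
--     if len(lista_verificar) > 0:
--         menor = min(lista_verificar)
--         return menor
--     elif len(lista_verificar) == 0:
--         return 0
-- ===== SOURCE B (Python) =====
-- def smallest_column(matriz, numerocol):
--     coluna = sorted(linha[numerocol] for linha in matriz)
--     for v in coluna: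
--         if v != 0:
--             return v
--     return 0
-- ===== Notes on version B (the rewrite author's own statement) =====
-- stated objective: alternative
-- what changed: Replaces A's collect/filter/min reduction with a sort-then-scan: sort the column ascending and return the first nonzero element (0 if none).
import Mathlib
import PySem

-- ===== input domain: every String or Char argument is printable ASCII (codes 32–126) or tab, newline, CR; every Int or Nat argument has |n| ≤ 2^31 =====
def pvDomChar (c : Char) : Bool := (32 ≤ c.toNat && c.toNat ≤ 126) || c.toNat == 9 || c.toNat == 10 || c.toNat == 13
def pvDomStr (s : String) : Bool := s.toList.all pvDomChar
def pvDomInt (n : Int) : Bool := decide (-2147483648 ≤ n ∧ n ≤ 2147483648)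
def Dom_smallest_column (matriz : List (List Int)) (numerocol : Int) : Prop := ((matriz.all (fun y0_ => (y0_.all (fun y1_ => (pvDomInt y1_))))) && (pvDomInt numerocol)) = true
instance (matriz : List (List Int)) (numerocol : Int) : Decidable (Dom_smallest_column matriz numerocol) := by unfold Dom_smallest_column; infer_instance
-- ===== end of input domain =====

-- B changes the algorithm: instead of A's collect/filter/min reduction, it sorts the column
-- ascending and returns the first nonzero element of the scan (alternative decomposition).

-- ===== PORT A =====
-- listamenores = [matriz[linha][numerocol] for linha in range(len(matriz))]; pyGetD is exact under Pre_
def smallest_column (matriz : List (List Int)) (numerocol : Int) : Int :=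
  let listamenores := matriz.map (fun linha => PySem.List.pyGetD linha numerocol 0)
  let lista_verificar := listamenores.filter (fun i => i != 0)
  if lista_verificar.length > 0 then
    (PySem.List.min? lista_verificar (fun x => x)).getD 0
  else 0

-- ===== PORT B =====
-- scan of the sorted column: first nonzero value, else 0
def firstNonzero : List Int → Int
  | [] => 0
  | v :: t => if v != 0 then v else firstNonzero t

def smallest_column_alt (matriz : List (List Int)) (numerocol : Int) : Int :=
  let coluna := PySem.List.sorted (matriz.map (fun linha => PySem.List.pyGetD linha numerocol 0)) (fun x => x) false
  firstNonzero coluna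

-- ===== PRECONDITION & SPEC =====
-- Pre_: matriz[linha][numerocol] must not raise IndexError: numerocol in range for every row
def Pre_smallest_column (matriz : List (List Int)) (numerocol : Int) : Prop :=
  ∀ linha ∈ matriz, PySem.Raise.InRange linha.length numerocol
instance (matriz : List (List Int)) (numerocol : Int) : Decidable (Pre_smallest_column matriz numerocol) := by unfold Pre_smallest_column; infer_instance
def pvWitness_smallest_column : List (List Int) × Int := ([[1, 2], [0, -3]], 1)

def Spec_smallest_column (matriz : List (List Int)) (numerocol : Int) (out : Int) : Prop := out = smallest_column_alt matriz numerocol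
instance (matriz : List (List Int)) (numerocol : Int) (out : Int) : Decidable (Spec_smallest_column matriz numerocol out) := by unfold Spec_smallest_column; infer_instance

-- ===== CLAIM (what is proved, stated in full; the proofs are below) =====
def Claim_equal_smallest_column : Prop := ∀ (matriz : List (List Int)) (numerocol : Int), Dom_smallest_column matriz numerocol → Pre_smallest_column matriz numerocol → Spec_smallest_column matriz numerocol (smallest_column matriz numerocol)

-- ===== LEMMAS AND PROOFS =====

-- the scan returns the head of the nonzero sublist
theorem firstNonzero_eq_headD_filter (S : List Int) :
    firstNonzero S = (S.filter (fun i => i != 0)).headD 0 := by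
  induction S with
  | nil => rfl
  | cons v t ih =>
    by_cases h : v = 0
    · simp [firstNonzero, h, ih]
    · simp [firstNonzero, h]

-- core: A's filter-then-min agrees with B's scan of any sorted rearrangement
theorem min_filter_eq_firstNonzero (L : List Int) :
    (if (L.filter (fun i => i != 0)).length > 0 then
      (PySem.List.min? (L.filter (fun i => i != 0)) (fun x => x)).getD 0
    else 0) = firstNonzero (PySem.List.sorted L (fun x => x) false) := by
  rw [firstNonzero_eq_headD_filter]
  have hperm : ((PySem.List.sorted L (fun x => x) false).filter (fun i => i != 0)).Perm
      (L.filter (fun i => i != 0)) := (PySem.List.sorted_perm L _ _).filter _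
  have hpw : ((PySem.List.sorted L (fun x => x) false).filter (fun i => i != 0)).Pairwise (· ≤ ·) :=
    (PySem.List.sorted_pairwise L (fun x => x)).filter _
  rcases hF : (PySem.List.sorted L (fun x => x) false).filter (fun i => i != 0) with _ | ⟨a, t⟩
  · have : L.filter (fun i => i != 0) = [] := by
      have := hperm; rw [hF] at this; exact this.symm.eq_nil
    simp [this]
  · rw [hF] at hperm hpw
    have hlen : (L.filter (fun i => i != 0)).length > 0 := by
      have := hperm.length_eq; simp at this; omega
    rw [if_pos hlen]
    rcases hm : PySem.List.min? (L.filter (fun i => i != 0)) (fun x => x) with _ | m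
    · rw [PySem.List.min?_eq_none_iff] at hm; simp [hm] at hlen
    · have hmem : m ∈ L.filter (fun i => i != 0) := PySem.List.min?_mem hm
      have hmin : ∀ y ∈ L.filter (fun i => i != 0), m ≤ y := by
        intro y hy; exact PySem.List.min?_isMin hm y hy
      have ham : a ∈ L.filter (fun i => i != 0) := hperm.mem_iff.mp (by simp)
      have h1 : m ≤ a := hmin a ham
      have h2 : a ≤ m := by
        have hmF : m ∈ a :: t := hperm.mem_iff.mpr hmem
        rcases List.mem_cons.mp hmF with h | h
        · omega
        · exact (List.pairwise_cons.mp hpw).1 m h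
      simp [le_antisymm h1 h2]

-- ===== VERDICT (by name: the statement is the Claim_ definition above) =====
theorem smallest_column_spec : Claim_equal_smallest_column := by
  intro matriz numerocol _ _
  unfold Spec_smallest_column smallest_column smallest_column_alt
  exact min_filter_eq_firstNonzero _
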